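-- pv_equiv track=rewrite | github.com/nicenike/quiz-telegram-bot | quiz_bot.py | next_level_info
-- ===== SOURCE A (Python) =====
-- def next_level_info(points: int):
--     levels = [
--         (0, "🌱 Новичок"),
--         (10, "📘 Эрудит"),
--         (25, "🥇 Знаток"),
--         (50, "🏆 Мастер"),
--         (100, "👑 Легенда"),
--     ]
--
--     for required_points, level_name in levels:
--         if points < required_points:
--             return level_name, required_points - points
--
--     return None, 0
-- ===== SOURCE B (Python) =====
-- def next_level_info(points: int):
--     thresholds = [0, 10, 25, 50, 100]
--     names = ["🌱 Новичок", "📘 Эрудит", "🥇 Знаток", "🏆 Мастер", "👑 Легенда"]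
--     # binary search for first threshold strictly greater than points (bisect_right)
--     lo, hi = 0, len(thresholds)
--     while lo < hi:
--         mid = (lo + hi) // 2
--         if points < thresholds[mid]:
--             hi = mid
--         else:
--             lo = mid + 1
--     if lo < len(thresholds):
--         return names[lo], thresholds[lo] - points
--     return None, 0
-- ===== Notes on version B (the rewrite author's own statement) =====
-- stated objective: alternative
-- what changed: Replaced the linear scan over (threshold, name) pairs with a binary search (bisect_right style while-loop) over a sorted thresholds list plus a parallel names list.
import Mathlib
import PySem

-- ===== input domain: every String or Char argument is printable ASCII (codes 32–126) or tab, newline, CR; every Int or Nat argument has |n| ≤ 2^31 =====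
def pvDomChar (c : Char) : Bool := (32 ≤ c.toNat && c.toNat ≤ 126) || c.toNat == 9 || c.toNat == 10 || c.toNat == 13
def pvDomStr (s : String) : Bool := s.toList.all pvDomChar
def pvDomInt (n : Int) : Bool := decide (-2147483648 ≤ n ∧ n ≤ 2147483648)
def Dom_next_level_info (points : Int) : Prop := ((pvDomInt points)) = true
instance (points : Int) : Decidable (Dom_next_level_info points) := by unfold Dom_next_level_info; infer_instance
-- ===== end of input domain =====

-- B replaces A's linear scan over the level table with a binary search (bisect_right) over a
-- thresholds list and a parallel names list; same return value, alternative algorithm.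
-- ===== PORT A =====
def nextLevelLoop (points : Int) : List (Int × String) → Option String × Int
  | [] => (none, 0)
  | (rp, nm) :: rest => if points < rp then (some nm, rp - points) else nextLevelLoop points rest

def next_level_info (points : Int) : Option String × Int :=
  nextLevelLoop points
    [(0, "🌱 Новичок"), (10, "📘 Эрудит"), (25, "🥇 Знаток"), (50, "🏆 Мастер"), (100, "👑 Легенда")]

-- ===== PORT B =====
-- the while-loop of Source B, with fuel = list length as totality guard; all indices stay in
-- range (0 ≤ mid < hi ≤ length), so List.getD is exact for Python's thresholds[mid]
def bsLoop (points : Int) (ts : List Int) : Nat → Nat → Nat → Nat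
  | 0, lo, _ => lo
  | fuel + 1, lo, hi =>
    if lo < hi then
      let mid := (lo + hi) / 2
      if points < ts.getD mid 0 then bsLoop points ts fuel lo mid
      else bsLoop points ts fuel (mid + 1) hi
    else lo

def next_level_info_alt (points : Int) : Option String × Int :=
  let thresholds : List Int := [0, 10, 25, 50, 100]
  let names : List String := ["🌱 Новичок", "📘 Эрудит", "🥇 Знаток", "🏆 Мастер", "👑 Легенда"]
  let lo := bsLoop points thresholds thresholds.length 0 thresholds.length
  if lo < thresholds.length then (some (names.getD lo ""), thresholds.getD lo 0 - points)
  else (none, 0)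

-- ===== PRECONDITION & SPEC =====
def Spec_next_level_info (points : Int) (out : Option String × Int) : Prop := out = next_level_info_alt points
instance (points : Int) (out : Option String × Int) : Decidable (Spec_next_level_info points out) := by unfold Spec_next_level_info; infer_instance

-- ===== CLAIM (what is proved, stated in full; the proofs are below) =====
def Claim_equal_next_level_info : Prop := ∀ (points : Int), Dom_next_level_info points → Spec_next_level_info points (next_level_info points)

-- ===== LEMMAS AND PROOFS =====

-- ===== VERDICT (by name: the statement is the Claim_ definition above) =====
theorem next_level_info_spec : Claim_equal_next_level_info := by
  intro p _
  unfold Spec_next_level_info next_level_info next_level_info_alt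
  simp only [nextLevelLoop, bsLoop, List.length, List.getD]
  norm_num
  split_ifs <;> simp_all <;> omega
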